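-- pv_equiv track=rewrite | github.com/mark-oskin/pyshell | pyshell/parser.py | _pipe_not_inside_quotes
-- ===== SOURCE A (Python) =====
-- def _pipe_not_inside_quotes(line: str) -> bool:
--     """True if there is a | that is not inside quotes (so we can split pipeline)."""
--     quote: str | None = None
--     for i, c in enumerate(line):
--         if quote:
--             if c == quote:
--                 quote = None
--             continue
--         if c in ("'", '"'):
--             quote = c
--             continue
--         if c == "|":
--             return True
--     return False
-- ===== SOURCE B (Python) =====
-- def _pipe_not_inside_quotes(line: str) -> bool:
--     """True if there is a | that is not inside quotes (so we can split pipeline)."""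
--     return any("|" in seg for seg in _unquoted_segments(line))
--
--
-- def _first_quote(line: str) -> int:
--     """Index of the first quote character (' or ") in line, or -1."""
--     i = line.find("'")
--     j = line.find('"')
--     if i == -1:
--         return j
--     if j == -1:
--         return i
--     return min(i, j)
--
--
-- def _unquoted_segments(line: str):
--     """Yield the pieces of line lying outside quotes (an unterminated quoted tail is dropped)."""
--     while True:
--         i = _first_quote(line)
--         if i == -1:
--             yield line
--             return
--         yield line[:i]
--         q = line[i]
--         line = line[i + 1:]
--         j = line.find(q)
--         if j == -1:
--             return
--         line = line[j + 1:]
-- ===== Notes on version B (the rewrite author's own statement) =====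
-- stated objective: faster
-- what changed: A is a single per-character state-machine scan carrying a quote-state variable; B is a staged decomposition: a helper generator splits the line into its unquoted segments, locating quote pairs with str.find and the minimum of the first-quote indices and dropping an unterminated quoted tail, and the entry point just asks whether any segment contains a pipe character.
import Mathlib
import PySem

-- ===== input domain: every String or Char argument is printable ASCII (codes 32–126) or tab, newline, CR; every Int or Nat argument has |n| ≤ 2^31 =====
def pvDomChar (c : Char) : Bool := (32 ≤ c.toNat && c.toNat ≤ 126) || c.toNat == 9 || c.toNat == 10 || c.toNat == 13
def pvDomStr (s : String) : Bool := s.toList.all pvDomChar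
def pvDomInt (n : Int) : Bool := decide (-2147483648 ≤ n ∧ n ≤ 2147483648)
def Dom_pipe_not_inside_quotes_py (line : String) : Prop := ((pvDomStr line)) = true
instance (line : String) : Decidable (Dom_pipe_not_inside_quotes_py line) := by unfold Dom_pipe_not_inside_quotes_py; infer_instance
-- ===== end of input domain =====

-- B replaces A's per-character quote-state scan by a staged decomposition: split the line
-- into its unquoted segments via find, then test any segment for a pipe (objective: faster
-- by a constant factor, measured).


-- ===== PORT A =====
-- A's for-loop over characters with the `quote` state variable.
def pipeA_go : Option Char → List Char → Bool
  | _, [] => false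
  | some q, c :: rest => pipeA_go (if c = q then none else some q) rest
  | none, c :: rest =>
    if c = '\'' || c = '"' then pipeA_go (some c) rest
    else if c = '|' then true
    else pipeA_go none rest

def pipe_not_inside_quotes_py (line : String) : Bool :=
  pipeA_go none line.toList

-- ===== PORT B =====
-- B's str.find(q): index of the first occurrence of q, -1 if absent.
def findChar (q : Char) : List Char → Int
  | [] => -1
  | c :: rest => if c = q then 0 else if findChar q rest = -1 then -1 else findChar q rest + 1

-- B's _first_quote helper.
def firstQuote (cs : List Char) : Int :=
  if findChar '\'' cs = -1 then findChar '"' cs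
  else if findChar '"' cs = -1 then findChar '\'' cs
  else min (findChar '\'' cs) (findChar '"' cs)

-- B's _unquoted_segments generator, as the list of segments it yields.
-- (cs.getD n ' ' ports line[i]: the index is in range whenever firstQuote cs ≠ -1.)
def segB (cs : List Char) : List (List Char) :=
  if hi : firstQuote cs = -1 then [cs]
  else
    let n := (firstQuote cs).toNat
    let q := cs.getD n ' '
    let rest := cs.drop (n + 1)
    let j := findChar q rest
    if j = -1 then [cs.take n]
    else cs.take n :: segB (rest.drop (j.toNat + 1))
termination_by cs.length
decreasing_by
  have hne : cs ≠ [] := by intro h; subst h; simp [firstQuote, findChar] at hi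
  have h1 : 1 ≤ cs.length := by
    cases cs with
    | nil => exact absurd rfl hne
    | cons a l => simp
  simp only [List.length_drop]
  omega

-- B's entry point: any("|" in seg for seg in segments).
def pipe_not_inside_quotes_py_alt (line : String) : Bool :=
  (segB line.toList).any (fun seg => seg.contains '|')

-- ===== PRECONDITION & SPEC =====
def Spec_pipe_not_inside_quotes_py (line : String) (out : Bool) : Prop := out = pipe_not_inside_quotes_py_alt line
instance (line : String) (out : Bool) : Decidable (Spec_pipe_not_inside_quotes_py line out) := by unfold Spec_pipe_not_inside_quotes_py; infer_instance

-- ===== CLAIM (what is proved, stated in full; the proofs are below) =====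
def Claim_equal_pipe_not_inside_quotes_py : Prop := ∀ (line : String), Dom_pipe_not_inside_quotes_py line → Spec_pipe_not_inside_quotes_py line (pipe_not_inside_quotes_py line)

-- ===== LEMMAS AND PROOFS =====

theorem findChar_cases (q : Char) (cs : List Char) :
    findChar q cs = -1 ∨ ∃ n : Nat, findChar q cs = (n : Int) := by
  induction cs with
  | nil => left; rfl
  | cons c rest ih =>
    by_cases h : c = q
    · right; exact ⟨0, by simp [findChar, h]⟩
    · rcases ih with h1 | ⟨n, hn⟩
      · left; simp [findChar, h, h1]
      · right; refine ⟨n + 1, ?_⟩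
        rw [findChar, if_neg h, hn, if_neg (by omega : (n : Int) ≠ -1)]
        omega

theorem findChar_neg_spec (q : Char) : ∀ (cs : List Char), findChar q cs = -1 →
    ∀ m, m < cs.length → cs.getD m ' ' ≠ q := by
  intro cs
  induction cs with
  | nil => intro _ m hm; simp at hm
  | cons c rest ih =>
    intro h m hm
    by_cases hc : c = q
    · rw [findChar, if_pos hc] at h; omega
    · have hrest : findChar q rest = -1 := by
        rcases findChar_cases q rest with h1 | ⟨n, hn⟩
        · exact h1
        · rw [findChar, if_neg hc, hn, if_neg (by omega : (n : Int) ≠ -1)] at h; omega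
      cases m with
      | zero => simpa using hc
      | succ m => exact ih hrest m (by simpa using hm)

theorem findChar_pos_spec (q : Char) : ∀ (cs : List Char) (n : Nat), findChar q cs = (n : Int) →
    n < cs.length ∧ cs.getD n ' ' = q ∧ ∀ m, m < n → cs.getD m ' ' ≠ q := by
  intro cs
  induction cs with
  | nil => intro n h; rw [findChar] at h; omega
  | cons c rest ih =>
    intro n h
    by_cases hc : c = q
    · rw [findChar, if_pos hc] at h
      have hn : n = 0 := by omega
      subst hn
      exact ⟨by simp, by simpa using hc, by intro m hm; omega⟩
    · rw [findChar, if_neg hc] at h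
      rcases findChar_cases q rest with h1 | ⟨k, hk⟩
      · rw [h1, if_pos rfl] at h; omega
      · rw [hk, if_neg (by omega : (k : Int) ≠ -1)] at h
        have hn : n = k + 1 := by omega
        subst hn
        obtain ⟨hl, hg, hp⟩ := ih k hk
        refine ⟨by simpa using hl, by simpa using hg, ?_⟩
        intro m hm
        cases m with
        | zero => simpa using hc
        | succ m => exact hp m (by omega)

theorem firstQuote_cases (cs : List Char) :
    firstQuote cs = -1 ∨ ∃ n : Nat, firstQuote cs = (n : Int) := by
  unfold firstQuote
  rcases findChar_cases '\'' cs with h1 | ⟨a, ha⟩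
  · rw [if_pos h1]; exact findChar_cases '"' cs
  · rw [if_neg (by rw [ha]; omega)]
    rcases findChar_cases '"' cs with h2 | ⟨b, hb⟩
    · rw [if_pos h2]; exact Or.inr ⟨a, ha⟩
    · rw [if_neg (by rw [hb]; omega)]
      refine Or.inr ⟨min a b, ?_⟩
      rw [ha, hb]
      omega

theorem firstQuote_neg_spec (cs : List Char) (h : firstQuote cs = -1) :
    ∀ m, m < cs.length → ¬(cs.getD m ' ' = '\'' ∨ cs.getD m ' ' = '"') := by
  intro m hm
  unfold firstQuote at h
  split_ifs at h with h1 h2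
  · rintro (ha | hb)
    · exact findChar_neg_spec '\'' cs h1 m hm ha
    · exact findChar_neg_spec '"' cs h m hm hb
  · exact absurd h h1
  · rcases findChar_cases '\'' cs with h3 | ⟨a, ha⟩
    · exact absurd h3 h1
    · rcases findChar_cases '"' cs with h4 | ⟨b, hb⟩
      · exact absurd h4 h2
      · rw [ha, hb] at h; omega

theorem firstQuote_pos_spec (cs : List Char) (n : Nat) (h : firstQuote cs = (n : Int)) :
    n < cs.length ∧ (cs.getD n ' ' = '\'' ∨ cs.getD n ' ' = '"') ∧
      ∀ m, m < n → ¬(cs.getD m ' ' = '\'' ∨ cs.getD m ' ' = '"') := by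
  unfold firstQuote at h
  split_ifs at h with h1 h2
  · obtain ⟨hl, hg, hp⟩ := findChar_pos_spec '"' cs n h
    refine ⟨hl, Or.inr hg, ?_⟩
    rintro m hm (ha | hb)
    · exact findChar_neg_spec '\'' cs h1 m (by omega) ha
    · exact hp m hm hb
  · obtain ⟨hl, hg, hp⟩ := findChar_pos_spec '\'' cs n h
    refine ⟨hl, Or.inl hg, ?_⟩
    rintro m hm (ha | hb)
    · exact hp m hm ha
    · exact findChar_neg_spec '"' cs h2 m (by omega) hb
  · rcases findChar_cases '\'' cs with h3 | ⟨a, ha⟩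
    · exact absurd h3 h1
    · rcases findChar_cases '"' cs with h4 | ⟨b, hb⟩
      · exact absurd h4 h2
      · rw [ha, hb] at h
        obtain ⟨hal, hag, hap⟩ := findChar_pos_spec '\'' cs a ha
        obtain ⟨hbl, hbg, hbp⟩ := findChar_pos_spec '"' cs b hb
        rcases Nat.le_total a b with hab | hab
        · have hn : n = a := by rw [Int.min_def] at h; split_ifs at h <;> omega
          subst hn
          refine ⟨hal, Or.inl hag, ?_⟩
          rintro m hm (hx | hy)
          · exact hap m hm hx
          · exact hbp m (by omega) hy
        · have hn : n = b := by rw [Int.min_def] at h; split_ifs at h <;> omega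
          subst hn
          refine ⟨hbl, Or.inr hbg, ?_⟩
          rintro m hm (hx | hy)
          · exact hap m (by omega) hx
          · exact hbp m hm hy

-- A over a quote-free prefix of length n: true iff the prefix holds '|', else continue.
theorem A_skip : ∀ (n : Nat) (cs : List Char), n ≤ cs.length →
    (∀ m, m < n → ¬(cs.getD m ' ' = '\'' ∨ cs.getD m ' ' = '"')) →
    pipeA_go none cs = ((cs.take n).contains '|' || pipeA_go none (cs.drop n)) := by
  intro n
  induction n with
  | zero => intro cs _ _; simp
  | succ n ih =>
    intro cs hlen hpre
    cases cs with
    | nil => simp at hlen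
    | cons c rest =>
      have hc : ¬(c = '\'' ∨ c = '"') := by simpa using hpre 0 (by omega)
      have hc' : ¬(c = '\'' || c = '"') = true := by
        simp only [Bool.or_eq_true, decide_eq_true_eq]; simpa using hc
      by_cases hp : c = '|'
      · subst hp
        simp only [pipeA_go, if_neg hc', List.take_succ_cons, List.contains_cons]
        simp
      · simp only [pipeA_go, if_neg hc', if_neg hp, List.take_succ_cons, List.drop_succ_cons,
          List.contains_cons]
        rw [ih rest (by simpa using hlen) (fun m hm => by simpa using hpre (m + 1) (by omega))]
        have hcb : ('|' == c) = false := by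
          simp only [beq_eq_false_iff_ne, ne_eq]
          exact fun he => hp he.symm
        simp [hcb]

theorem A_enter (q : Char) (hq : q = '\'' ∨ q = '"') (l : List Char) :
    pipeA_go none (q :: l) = pipeA_go (some q) l := by
  rcases hq with h | h <;> subst h <;> simp [pipeA_go]

theorem A_some_neg (q : Char) : ∀ (cs : List Char), findChar q cs = -1 →
    pipeA_go (some q) cs = false := by
  intro cs
  induction cs with
  | nil => intro _; rfl
  | cons c rest ih =>
    intro h
    by_cases hc : c = q
    · rw [findChar, if_pos hc] at h; omega
    · have hrest : findChar q rest = -1 := by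
        rcases findChar_cases q rest with h1 | ⟨k, hk⟩
        · exact h1
        · rw [findChar, if_neg hc, hk, if_neg (by omega : (k : Int) ≠ -1)] at h; omega
      simp only [pipeA_go, if_neg hc]
      exact ih hrest

theorem A_some_pos (q : Char) : ∀ (cs : List Char) (n : Nat), findChar q cs = (n : Int) →
    pipeA_go (some q) cs = pipeA_go none (cs.drop (n + 1)) := by
  intro cs
  induction cs with
  | nil => intro n h; rw [findChar] at h; omega
  | cons c rest ih =>
    intro n h
    by_cases hc : c = q
    · rw [findChar, if_pos hc] at h
      have hn : n = 0 := by omega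
      subst hn
      simp [pipeA_go, hc]
    · rw [findChar, if_neg hc] at h
      rcases findChar_cases q rest with h1 | ⟨k, hk⟩
      · rw [h1, if_pos rfl] at h; omega
      · rw [hk, if_neg (by omega : (k : Int) ≠ -1)] at h
        have hn : n = k + 1 := by omega
        subst hn
        simp only [pipeA_go, if_neg hc, List.drop_succ_cons]
        exact ih k hk

theorem main_aux : ∀ (N : Nat) (cs : List Char), cs.length ≤ N →
    pipeA_go none cs = (segB cs).any (fun seg => seg.contains '|') := by
  intro N
  induction N with
  | zero =>
    intro cs h
    have : cs = [] := List.eq_nil_of_length_eq_zero (Nat.le_zero.mp h)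
    subst this
    rw [segB]
    simp [firstQuote, findChar, pipeA_go]
  | succ N ih =>
    intro cs hlen
    rcases firstQuote_cases cs with hfq | ⟨n, hfq⟩
    · rw [segB, dif_pos hfq]
      have := A_skip cs.length cs le_rfl (fun m hm => firstQuote_neg_spec cs hfq m hm)
      simp only [List.take_length, List.drop_length] at this
      simp [this, pipeA_go]
    · obtain ⟨hlt, hq, hpre⟩ := firstQuote_pos_spec cs n hfq
      rw [segB, dif_neg (by rw [hfq]; omega)]
      simp only [hfq, Int.toNat_natCast]
      have hdropn : cs.drop n = cs.getD n ' ' :: cs.drop (n + 1) := by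
        rw [List.getD_eq_getElem cs ' ' hlt]
        exact List.drop_eq_getElem_cons hlt
      have hA : pipeA_go none cs
          = ((cs.take n).contains '|' || pipeA_go (some (cs.getD n ' ')) (cs.drop (n + 1))) := by
        rw [A_skip n cs (Nat.le_of_lt hlt) hpre, hdropn, A_enter _ hq]
      rcases findChar_cases (cs.getD n ' ') (cs.drop (n + 1)) with hj | ⟨m, hj⟩
      · rw [hj, if_pos rfl]
        rw [hA, A_some_neg _ _ hj]
        simp
      · rw [hj, if_neg (by omega)]
        rw [hA, A_some_pos _ _ _ hj]
        have hlen2 : ((cs.drop (n + 1)).drop (m + 1)).length ≤ N := by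
          simp only [List.length_drop]; omega
        rw [ih _ hlen2]
        simp [Int.toNat_natCast]

-- ===== VERDICT (by name: the statement is the Claim_ definition above) =====
theorem pipe_not_inside_quotes_py_spec : Claim_equal_pipe_not_inside_quotes_py := by
  intro line _
  unfold Spec_pipe_not_inside_quotes_py pipe_not_inside_quotes_py pipe_not_inside_quotes_py_alt
  exact main_aux line.toList.length line.toList (Nat.le_refl _)
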